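-- pv_equiv track=rewrite | github.com/LABdrian/app | app/strategie.py | transformations
-- ===== SOURCE A (Python) =====
-- def transformations(tuples_list):
--     new_list = []
--     for i, tuple in enumerate(tuples_list):
--         if i == 0 or i == 1:
--             new_list.append(tuple[0])
--         elif 2 <= i <= 15:
--             new_list.append(tuple[1])
--     return new_list
-- ===== SOURCE B (Python) =====
-- def transformations(tuples_list):
--     def go(rest, heads, tails):
--         if not rest:
--             return []
--         if heads > 0:
--             return [rest[0][0]] + go(rest[1:], heads - 1, tails)
--         if tails > 0:
--             return [rest[0][1]] + go(rest[1:], heads, tails - 1)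
--         return []
--     return go(tuples_list, 2, 14)
-- ===== Notes on version B (the rewrite author's own statement) =====
-- stated objective: alternative
-- what changed: Replaces A's enumerate loop with index-range branches by a structural recursion carrying two countdown budgets (2 first-component picks, then 14 second-component picks) that stops as soon as both budgets are spent.
import Mathlib
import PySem

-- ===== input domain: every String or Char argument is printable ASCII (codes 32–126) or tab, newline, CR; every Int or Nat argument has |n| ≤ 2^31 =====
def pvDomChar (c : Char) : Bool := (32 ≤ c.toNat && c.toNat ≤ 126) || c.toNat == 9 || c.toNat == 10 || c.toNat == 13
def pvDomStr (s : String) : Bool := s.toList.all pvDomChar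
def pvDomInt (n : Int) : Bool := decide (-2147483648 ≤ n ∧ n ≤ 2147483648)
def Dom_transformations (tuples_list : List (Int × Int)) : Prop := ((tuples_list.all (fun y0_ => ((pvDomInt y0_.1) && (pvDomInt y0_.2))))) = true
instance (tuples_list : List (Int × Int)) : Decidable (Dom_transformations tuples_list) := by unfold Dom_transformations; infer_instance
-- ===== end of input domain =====

-- B replaces A's enumerate loop with index branches by a structural recursion with countdown budgets; objective: alternative.


-- ===== PORT A =====
-- loop body of A: index-branching append
def transformationsStep (acc : List Int) (p : Int × (Int × Int)) : List Int :=
  if p.1 = 0 ∨ p.1 = 1 then acc ++ [p.2.1]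
  else if 2 ≤ p.1 ∧ p.1 ≤ 15 then acc ++ [p.2.2]
  else acc

def transformations (tuples_list : List (Int × Int)) : List Int :=
  (PySem.List.enumerate tuples_list 0).foldl transformationsStep []

-- ===== PORT B =====
-- recursion on the list with two countdown budgets (heads, then tails)
def transformationsGo : List (Int × Int) → Nat → Nat → List Int
  | [], _, _ => []
  | t :: rest, heads, tails =>
    if heads > 0 then t.1 :: transformationsGo rest (heads - 1) tails
    else if tails > 0 then t.2 :: transformationsGo rest heads (tails - 1)
    else []

def transformations_alt (tuples_list : List (Int × Int)) : List Int :=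
  transformationsGo tuples_list 2 14

-- ===== PRECONDITION & SPEC =====
def Spec_transformations (tuples_list : List (Int × Int)) (out : List Int) : Prop := out = transformations_alt tuples_list
instance (tuples_list : List (Int × Int)) (out : List Int) : Decidable (Spec_transformations tuples_list out) := by unfold Spec_transformations; infer_instance

-- ===== CLAIM (what is proved, stated in full; the proofs are below) =====
def Claim_equal_transformations : Prop := ∀ (tuples_list : List (Int × Int)), Dom_transformations tuples_list → Spec_transformations tuples_list (transformations tuples_list)

-- ===== LEMMAS AND PROOFS =====
-- the per-element contribution of A's loop, as a flatMap kernel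
def transformationsPick (p : Int × (Int × Int)) : List Int :=
  if p.1 = 0 ∨ p.1 = 1 then [p.2.1]
  else if 2 ≤ p.1 ∧ p.1 ≤ 15 then [p.2.2]
  else []

theorem transformationsStep_eq (acc : List Int) (p : Int × (Int × Int)) :
    transformationsStep acc p = acc ++ transformationsPick p := by
  unfold transformationsStep transformationsPick
  split_ifs <;> simp

-- A's loop over enumerate starting at any index s, in closed form
theorem transformations_aux (l : List (Int × Int)) : ∀ (s : Nat),
    (PySem.List.enumerate l (s : Int)).flatMap transformationsPick
      = (l.take (2 - s)).map Prod.fst ++ ((l.drop (2 - s)).take (16 - max 2 s)).map Prod.snd := by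
  induction l with
  | nil => intro s; simp [PySem.List.enumerate_nil]
  | cons t rest ih =>
    intro s
    rw [PySem.List.enumerate_cons]
    have hs1 : ((s : Int) + 1) = ((s + 1 : Nat) : Int) := by push_cast; ring
    rw [List.flatMap_cons, hs1, ih (s + 1)]
    unfold transformationsPick
    rcases Nat.lt_or_ge s 2 with h | h
    · have h0 : (s : Int) = 0 ∨ (s : Int) = 1 := by omega
      have h2 : 2 - s = (2 - (s+1)) + 1 := by omega
      simp only [if_pos h0, h2, List.take_succ_cons, List.drop_succ_cons, List.map_cons]
      have : max 2 s = 2 ∧ max 2 (s+1) = 2 := by omega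
      simp [this.1, this.2]
    · have h0 : ¬ ((s : Int) = 0 ∨ (s : Int) = 1) := by omega
      have h2 : 2 - s = 0 ∧ 2 - (s+1) = 0 := by omega
      rcases Nat.lt_or_ge s 16 with h16 | h16
      · have hc : 2 ≤ (s : Int) ∧ (s : Int) ≤ 15 := by omega
        have hn0 : ¬ (s = 0 ∨ s = 1) := by omega
        have hm : 16 - max 2 s = (16 - max 2 (s+1)) + 1 := by omega
        simp [hc, hn0, h2.1, h2.2, hm]
      · have hc : ¬ (2 ≤ (s : Int) ∧ (s : Int) ≤ 15) := by omega
        have hn0 : ¬ (s = 0 ∨ s = 1) := by omega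
        have hnc : ¬ (2 ≤ s ∧ s ≤ 15) := by omega
        have hm : 16 - max 2 s = 0 ∧ 16 - max 2 (s+1) = 0 := by omega
        simp [hn0, hnc, h2.1, h2.2, hm.1, hm.2]

-- B's recursion in the same closed form
theorem transformationsGo_eq (l : List (Int × Int)) : ∀ (heads tails : Nat),
    transformationsGo l heads tails
      = (l.take heads).map Prod.fst ++ ((l.drop heads).take tails).map Prod.snd := by
  induction l with
  | nil => intro heads tails; simp [transformationsGo]
  | cons t rest ih =>
    intro heads tails
    unfold transformationsGo
    rcases Nat.eq_zero_or_pos heads with hh | hh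
    · subst hh
      rcases Nat.eq_zero_or_pos tails with ht | ht
      · subst ht; simp
      · have ht' : tails = (tails - 1) + 1 := by omega
        simp only [Nat.lt_irrefl, if_false, if_pos ht, List.drop_zero]
        rw [ht', List.take_succ_cons]
        simp [ih]
    · have hh' : heads = (heads - 1) + 1 := by omega
      rw [if_pos hh, ih, hh', List.take_succ_cons, List.drop_succ_cons]
      simp

-- ===== VERDICT (by name: the statement is the Claim_ definition above) =====
theorem transformations_spec : Claim_equal_transformations := by
  intro l _
  unfold Spec_transformations transformations transformations_alt
  have hstep : (PySem.List.enumerate l 0).foldl transformationsStep []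
      = (PySem.List.enumerate l 0).flatMap transformationsPick := by
    have := PySem.List.foldl_append_eq_flatMap transformationsPick
      (l := PySem.List.enumerate l 0) (acc := ([] : List Int))
    simp only [List.nil_append] at this
    rw [← this]
    congr 1
    funext acc p
    exact transformationsStep_eq acc p
  have h0 : ((0 : Int)) = ((0 : Nat) : Int) := rfl
  rw [hstep, h0, transformations_aux l 0, transformationsGo_eq l 2 14]
  norm_num
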